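-- pv_equiv track=rewrite | github.com/CPSC-440-CPU-Arch/RISCSim | src/bit_utils.py | hex_string_to_bits
-- ===== SOURCE A (Python) =====
-- def hex_string_to_bits(hex_str, width=32):
--     """Convert hex string to bit array using manual lookup tables.
--
--     No use of int() with base conversion.
--
--     Args:
--         hex_str: String like "0xAC3F" or "AC3F"
--         width: Target bit width (default 32, will zero-extend if needed)
--
--     Returns:
--         List of bits
--
--     Raises:
--         ValueError: If hex string contains invalid characters
--     """
--     # Remove 0x prefix if present
--     if hex_str.startswith("0x") or hex_str.startswith("0X"):
--         hex_str = hex_str[2:]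
--
--     # Manual lookup table for hex digit to nibble
--     nibble_map = {
--         '0': [0,0,0,0], '1': [0,0,0,1], '2': [0,0,1,0], '3': [0,0,1,1],
--         '4': [0,1,0,0], '5': [0,1,0,1], '6': [0,1,1,0], '7': [0,1,1,1],
--         '8': [1,0,0,0], '9': [1,0,0,1], 'A': [1,0,1,0], 'B': [1,0,1,1],
--         'C': [1,1,0,0], 'D': [1,1,0,1], 'E': [1,1,1,0], 'F': [1,1,1,1],
--         'a': [1,0,1,0], 'b': [1,0,1,1], 'c': [1,1,0,0], 'd': [1,1,0,1],
--         'e': [1,1,1,0], 'f': [1,1,1,1],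
--     }
--
--     bits = []
--     for char in hex_str:
--         if char in nibble_map:
--             bits.extend(nibble_map[char])
--         else:
--             raise ValueError(f"Invalid hex character: {char}")
--
--     # Pad or truncate to target width
--     while len(bits) < width:
--         bits = [0] + bits
--     if len(bits) > width:
--         bits = bits[len(bits) - width:]
--
--     return bits
-- ===== SOURCE B (Python) =====
-- _HEX_VAL = {}
-- for _i, _c in enumerate("0123456789abcdef"):
--     _HEX_VAL[_c] = _i
--     _HEX_VAL[_c.upper()] = _i
--
--
-- def hex_string_to_bits(hex_str, width=32):
--     """Convert hex string to bit list via a single integer accumulator."""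
--     if hex_str.startswith("0x") or hex_str.startswith("0X"):
--         hex_str = hex_str[2:]
--     value = 0
--     for char in hex_str:
--         if char not in _HEX_VAL:
--             raise ValueError(f"Invalid hex character: {char}")
--         value = value * 16 + _HEX_VAL[char]
--     bit_str = format(value, "b").zfill(width)
--     return [ord(c) - 48 for c in bit_str[len(bit_str) - width:]]
-- ===== Notes on version B (the rewrite author's own statement) =====
-- stated objective: simpler
-- what changed: B replaces A's growing per-nibble bit list plus the prepend-zero while loop and slice truncation by a single integer accumulator (value = value*16 + digit) rendered through binary string formatting and zfill, which zero-extend and truncate in one slice.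
import Mathlib
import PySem

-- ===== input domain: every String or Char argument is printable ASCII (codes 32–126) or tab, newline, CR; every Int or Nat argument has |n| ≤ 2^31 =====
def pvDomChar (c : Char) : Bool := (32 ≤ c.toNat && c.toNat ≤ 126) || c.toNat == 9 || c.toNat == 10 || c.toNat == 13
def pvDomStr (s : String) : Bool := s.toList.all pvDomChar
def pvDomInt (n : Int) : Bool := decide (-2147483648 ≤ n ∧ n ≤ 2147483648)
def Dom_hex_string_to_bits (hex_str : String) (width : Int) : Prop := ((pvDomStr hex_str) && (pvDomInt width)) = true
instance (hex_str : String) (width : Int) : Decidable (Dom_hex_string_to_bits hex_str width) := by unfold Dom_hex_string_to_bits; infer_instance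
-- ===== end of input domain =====

-- B replaces A's growing nibble-bit list plus pad/truncate loops by a single integer
-- accumulator rendered through binary formatting, zfill and one slice (objective: simpler).


-- ===== PORT A =====
-- shared prefix strip: both Pythons begin with the identical
-- 'if hex_str.startswith("0x") or hex_str.startswith("0X"): hex_str = hex_str[2:]'
def pvStripped (hex_str : String) : List Char :=
  if PySem.Str.startswith hex_str "0x" || PySem.Str.startswith hex_str "0X"
  then (PySem.Str.slice hex_str (some 2) none).toList
  else hex_str.toList

-- A's nibble_map lookup table (none = key absent)
def pvNibble? (c : Char) : Option (List Int) :=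
  match c with
  | '0' => some [0,0,0,0] | '1' => some [0,0,0,1] | '2' => some [0,0,1,0] | '3' => some [0,0,1,1]
  | '4' => some [0,1,0,0] | '5' => some [0,1,0,1] | '6' => some [0,1,1,0] | '7' => some [0,1,1,1]
  | '8' => some [1,0,0,0] | '9' => some [1,0,0,1] | 'A' => some [1,0,1,0] | 'B' => some [1,0,1,1]
  | 'C' => some [1,1,0,0] | 'D' => some [1,1,0,1] | 'E' => some [1,1,1,0] | 'F' => some [1,1,1,1]
  | 'a' => some [1,0,1,0] | 'b' => some [1,0,1,1] | 'c' => some [1,1,0,0] | 'd' => some [1,1,0,1]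
  | 'e' => some [1,1,1,0] | 'f' => some [1,1,1,1]
  | _ => none

-- A's loop body: 'if char in nibble_map: bits.extend(...) else: raise ValueError'
-- (the none branch is where Python raises; those inputs are excluded by Pre_)
def pvNibStep (acc : List Int) (c : Char) : List Int :=
  match pvNibble? c with
  | some ns => acc ++ ns
  | none => acc

-- A's 'while len(bits) < width: bits = [0] + bits'
def pvPadLoop (bits : List Int) (width : Int) : List Int :=
  if (bits.length : Int) < width then pvPadLoop ((0 : Int) :: bits) width else bits
termination_by (width - (bits.length : Int)).toNat
decreasing_by simp only [List.length_cons]; omega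

def hex_string_to_bits (hex_str : String) (width : Int) : List Int :=
  let bits := (pvStripped hex_str).foldl pvNibStep []
  let bits := pvPadLoop bits width
  if (bits.length : Int) > width then
    PySem.List.slice bits (some ((bits.length : Int) - width)) none
  else bits

-- ===== PORT B =====
-- B's _HEX_VAL lookup table (none = key absent)
def pvHexVal? (c : Char) : Option Int :=
  match c with
  | '0' => some 0 | '1' => some 1 | '2' => some 2 | '3' => some 3
  | '4' => some 4 | '5' => some 5 | '6' => some 6 | '7' => some 7
  | '8' => some 8 | '9' => some 9
  | 'a' => some 10 | 'b' => some 11 | 'c' => some 12 | 'd' => some 13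
  | 'e' => some 14 | 'f' => some 15
  | 'A' => some 10 | 'B' => some 11 | 'C' => some 12 | 'D' => some 13
  | 'E' => some 14 | 'F' => some 15
  | _ => none

-- B's loop body: 'value = value * 16 + _HEX_VAL[char]'
-- (on an absent key Python raises ValueError; those inputs are excluded by Pre_)
def pvValStep (a : Int) (c : Char) : Int := a * 16 + (pvHexVal? c).getD 0

-- binary-format of a POSITIVE n, ported by hand digit for digit (most significant first)
def pvBinNat (n : Nat) : List Char :=
  if n = 0 then [] else pvBinNat (n / 2) ++ [if n % 2 = 1 then '1' else '0']
decreasing_by exact Nat.div_lt_self (by omega) (by omega)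

-- binary-format of value: B's accumulator is never negative, so this hand port is exact
def pvBinChars (v : Int) : List Char := if v = 0 then ['0'] else pvBinNat v.toNat

def hex_string_to_bits_alt (hex_str : String) (width : Int) : List Int :=
  let value := (pvStripped hex_str).foldl pvValStep 0
  let bit_str := PySem.Chars.zfill (pvBinChars value) width
  -- 'ord(c) - 48' is '(c.toNat : Int) - 48'
  (PySem.List.slice bit_str (some ((bit_str.length : Int) - width)) none).map
    (fun c => (c.toNat : Int) - 48)

-- ===== PRECONDITION & SPEC =====
def pvHexDigit (c : Char) : Bool :=
  c ∈ ['0','1','2','3','4','5','6','7','8','9','a','b','c','d','e','f','A','B','C','D','E','F']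

-- Pre_ excludes exactly the inputs on which A raises ValueError:
-- a non-hex character after the optional 0x/0X prefix.
def Pre_hex_string_to_bits (hex_str : String) (width : Int) : Prop :=
  (pvStripped hex_str).all pvHexDigit = true
instance (hex_str : String) (width : Int) : Decidable (Pre_hex_string_to_bits hex_str width) := by
  unfold Pre_hex_string_to_bits; infer_instance

def pvWitness_hex_string_to_bits : String × Int := ("0xAC3F", 8)

def Spec_hex_string_to_bits (hex_str : String) (width : Int) (out : List Int) : Prop :=
  out = hex_string_to_bits_alt hex_str width
instance (hex_str : String) (width : Int) (out : List Int) : Decidable (Spec_hex_string_to_bits hex_str width out) := by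
  unfold Spec_hex_string_to_bits; infer_instance

-- ===== CLAIM (what is proved, stated in full; the proofs are below) =====
def Claim_equal_hex_string_to_bits : Prop := ∀ (hex_str : String) (width : Int), Dom_hex_string_to_bits hex_str width → Pre_hex_string_to_bits hex_str width → Spec_hex_string_to_bits hex_str width (hex_string_to_bits hex_str width)

-- ===== LEMMAS AND PROOFS =====

-- the while loop prepends exactly (width - len).toNat zeros
theorem pvPadLoop_eq (bits : List Int) (width : Int) :
    pvPadLoop bits width = List.replicate (width - (bits.length : Int)).toNat 0 ++ bits := by
  fun_induction pvPadLoop bits width with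
  | case1 bits h ih =>
    rw [ih]
    have h1 : (width - ((0 :: bits).length : Int)).toNat + 1 = (width - (bits.length : Int)).toNat := by
      simp only [List.length_cons]; omega
    rw [← h1, List.replicate_succ']
    simp
  | case2 bits h =>
    have h0 : (width - (bits.length : Int)).toNat = 0 := by omega
    simp [h0]

-- per-character step: A's nibble append and B's value step agree
theorem pvStep_spec (c : Char) (h : pvHexDigit c = true) (acc : List Int)
    (hacc : ∀ b ∈ acc, b = 0 ∨ b = 1) (x : Int) :
    (∀ b ∈ pvNibStep acc c, b = 0 ∨ b = 1) ∧
    (pvNibStep acc c).foldl (fun a b => 2 * a + b) x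
      = 16 * (acc.foldl (fun a b => 2 * a + b) x) + (pvHexVal? c).getD 0 := by
  simp only [pvHexDigit, List.mem_cons, List.not_mem_nil, or_false, decide_eq_true_eq] at h
  rcases h with rfl|rfl|rfl|rfl|rfl|rfl|rfl|rfl|rfl|rfl|rfl|rfl|rfl|rfl|rfl|rfl|rfl|rfl|rfl|rfl|rfl|rfl <;>
    refine ⟨?_, ?_⟩ <;>
    · first
      | (intro b hb
         simp only [pvNibStep, pvNibble?, List.mem_append, List.mem_cons, List.not_mem_nil, or_false] at hb
         rcases hb with hb | hb | hb | hb | hb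
         · exact hacc b hb
         all_goals omega)
      | (simp [pvNibStep, pvNibble?, pvHexVal?, List.foldl]; ring)

-- whole-fold invariant: A's bits list encodes B's accumulator in binary
theorem pvFold_spec (l : List Char) (acc : List Int)
    (hl : l.all pvHexDigit = true) (hacc : ∀ b ∈ acc, b = 0 ∨ b = 1) :
    (∀ b ∈ l.foldl pvNibStep acc, b = 0 ∨ b = 1) ∧
    (l.foldl pvNibStep acc).foldl (fun a b => 2 * a + b) 0
      = l.foldl pvValStep (acc.foldl (fun a b => 2 * a + b) 0) := by
  induction l generalizing acc with
  | nil => exact ⟨hacc, rfl⟩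
  | cons c l ih =>
    simp only [List.all_cons, Bool.and_eq_true] at hl
    obtain ⟨hstepb, hstepv⟩ := pvStep_spec c hl.1 acc hacc 0
    obtain ⟨hb, hv⟩ := ih (pvNibStep acc c) hl.2 hstepb
    refine ⟨hb, ?_⟩
    simp only [List.foldl_cons]
    rw [hv, hstepv]
    congr 1
    simp only [pvValStep]
    ring

-- extracting bit k of the encoded value reads the list from the right
theorem pvBitAt (bits : List Int) (hb : ∀ b ∈ bits, b = 0 ∨ b = 1) (k : Nat) :
    PySem.Int.mod (PySem.Int.floordiv (bits.foldl (fun a b => 2 * a + b) 0) (2 ^ k)) 2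
      = if k < bits.length then bits.getD (bits.length - 1 - k) 0 else 0 := by
  induction bits using List.reverseRecOn generalizing k with
  | nil =>
    rw [PySem.Int.floordiv_eq_ediv_of_pos (by positivity), PySem.Int.mod_eq_emod_of_pos (by norm_num)]
    simp
  | append_singleton l b ih =>
    have hb0 : b = 0 ∨ b = 1 := hb b (by simp)
    have hbl : ∀ x ∈ l, x = 0 ∨ x = 1 := fun x hx => hb x (by simp [hx])
    rw [List.foldl_append]
    simp only [List.foldl_cons, List.foldl_nil]
    set A := l.foldl (fun a b => 2 * a + b) 0 with hA
    rw [PySem.Int.floordiv_eq_ediv_of_pos (by positivity), PySem.Int.mod_eq_emod_of_pos (by norm_num)]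
    cases k with
    | zero =>
      have h1 : (2 * A + b) / 2 ^ 0 = 2 * A + b := by simp
      rw [h1]
      have h2 : (2 * A + b) % 2 = b := by omega
      rw [h2]
      simp only [List.length_append, List.length_cons, List.length_nil]
      rw [if_pos (by omega)]
      have h4 : l.length + 1 - 1 - 0 = l.length := by omega
      rw [h4, List.getD_append_right _ _ _ _ (by omega)]
      simp
    | succ k =>
      have h1 : (2 * A + b) / 2 ^ (k + 1) = A / 2 ^ k := by
        rw [pow_succ, mul_comm (2 ^ k) 2, ← Int.ediv_ediv_of_nonneg (by norm_num)]
        congr 1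
        omega
      rw [h1, ← PySem.Int.floordiv_eq_ediv_of_pos (by positivity),
        ← PySem.Int.mod_eq_emod_of_pos (by norm_num : (0:Int) < 2), ih hbl k]
      simp only [List.length_append, List.length_cons, List.length_nil]
      by_cases hk : k < l.length
      · rw [if_pos hk, if_pos (by omega)]
        rw [List.getD_append _ _ _ _ (by omega)]
        congr 1
        omega
      · rw [if_neg hk, if_neg (by omega)]

-- every character format produces is a binary digit
theorem pvBinNat_digits (n : Nat) : ∀ c ∈ pvBinNat n, c = '0' ∨ c = '1' := by
  fun_induction pvBinNat n with
  | case1 => simp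
  | case2 n h ih =>
    intro c hc
    rcases List.mem_append.mp hc with hc | hc
    · exact ih c hc
    · simp only [List.mem_cons, List.not_mem_nil, or_false] at hc
      subst hc
      split <;> simp
-- format's output read from the right is the binary expansion
theorem pvBinNat_spec (n : Nat) :
    n < 2 ^ (pvBinNat n).length ∧
    ∀ k, k < (pvBinNat n).length →
      (pvBinNat n).getD ((pvBinNat n).length - 1 - k) ' ' = (if n / 2 ^ k % 2 = 1 then '1' else '0') := by
  fun_induction pvBinNat n with
  | case1 => simp
  | case2 n h ih =>
    obtain ⟨ihlt, ihget⟩ := ih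
    have hlen : (pvBinNat (n / 2) ++ [if n % 2 = 1 then '1' else '0']).length
        = (pvBinNat (n / 2)).length + 1 := by simp
    constructor
    · rw [hlen, pow_succ]
      omega
    · intro k hk
      rw [hlen] at hk
      rw [hlen]
      cases k with
      | zero =>
        have h1 : (pvBinNat (n / 2)).length + 1 - 1 - 0 = (pvBinNat (n / 2)).length := by omega
        rw [h1, List.getD_append_right _ _ _ _ (by omega)]
        simp only [Nat.sub_self, List.getD_cons_zero]
        have : n / 2 ^ 0 % 2 = n % 2 := by simp
        rw [this]
      | succ k =>
        have h1 : (pvBinNat (n / 2)).length + 1 - 1 - (k + 1) = (pvBinNat (n / 2)).length - 1 - k := by omega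
        rw [h1, List.getD_append _ _ _ _ (by omega), ihget k (by omega)]
        have : n / 2 / 2 ^ k = n / 2 ^ (k + 1) := by
          rw [Nat.div_div_eq_div_mul, pow_succ, mul_comm 2 (2^k)]
        rw [this]
theorem pvBinChars_spec (m : Nat) :
    (∀ c ∈ pvBinChars (m : Int), c = '0' ∨ c = '1') ∧ pvBinChars (m : Int) ≠ [] ∧
    m < 2 ^ (pvBinChars (m : Int)).length ∧
    ∀ k, k < (pvBinChars (m : Int)).length →
      (pvBinChars (m : Int)).getD ((pvBinChars (m : Int)).length - 1 - k) ' '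
        = (if m / 2 ^ k % 2 = 1 then '1' else '0') := by
  by_cases hm : m = 0
  · subst hm
    refine ⟨by simp [pvBinChars], by simp [pvBinChars], by simp [pvBinChars], ?_⟩
    intro k hk
    have hk0 : k = 0 := by simpa [pvBinChars] using hk
    subst hk0
    simp [pvBinChars]
  · have hv : ((m : Int) ≠ 0) := by exact_mod_cast hm
    have h0 : pvBinChars (m : Int) = pvBinNat m := by
      rw [pvBinChars, if_neg hv]
      simp
    rw [h0]
    have hne : pvBinNat m ≠ [] := by
      intro hcon
      have := (pvBinNat_spec m).1
      rw [hcon] at this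
      simp at this
      exact hm this
    exact ⟨pvBinNat_digits m, hne, (pvBinNat_spec m).1, (pvBinNat_spec m).2⟩
-- zfill on a sign-free string is plain left padding
theorem pvZfill_eq (s : List Char) (hd : ∀ c ∈ s, c = '0' ∨ c = '1') (hne : s ≠ []) (w : Int) :
    PySem.Chars.zfill s w = List.replicate (w - (s.length : Int)).toNat '0' ++ s := by
  rw [PySem.Chars.zfill.eq_def]
  by_cases hw : w ≤ (s.length : Int)
  · rw [if_pos hw]
    have : (w - (s.length : Int)).toNat = 0 := by omega
    simp [this]
  · rw [if_neg hw]
    cases s with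
    | nil => exact absurd rfl hne
    | cons c rest =>
      have hc : c = '0' ∨ c = '1' := hd c (by simp)
      have hcs : ¬(c = '+' ∨ c = '-') := by rcases hc with rfl | rfl <;> decide
      dsimp only
      rw [if_neg hcs]
      have hcount : w.toNat - (c :: rest).length = (w - ((c :: rest).length : Int)).toNat := by
        simp only [List.length_cons]
        omega
      rw [hcount]
-- a 0/1 bit list encodes a nonnegative value
theorem pvOfBits_nonneg (bits : List Int) (hb : ∀ b ∈ bits, b = 0 ∨ b = 1) :
    0 ≤ bits.foldl (fun a b => 2 * a + b) 0 := by
  suffices h : ∀ (x : Int), 0 ≤ x → 0 ≤ bits.foldl (fun a b => 2 * a + b) x from h 0 le_rfl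
  induction bits with
  | nil => intro x hx; simpa using hx
  | cons b l ih =>
    intro x hx
    simp only [List.foldl_cons]
    have hb0 : b = 0 ∨ b = 1 := hb b (by simp)
    exact ih (fun c hc => hb c (by simp [hc])) _ (by omega)
-- B's format/zfill/slice pipeline equals arithmetic bit extraction
theorem pvFormat_eq (v : Int) (hv : 0 ≤ v) (width : Int) :
    (PySem.List.slice (PySem.Chars.zfill (pvBinChars v) width)
        (some (((PySem.Chars.zfill (pvBinChars v) width).length : Int) - width)) none).map
      (fun c => (c.toNat : Int) - 48)
      = (PySem.List.pyRange 0 width 1).map (fun j =>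
          PySem.Int.mod (PySem.Int.floordiv v (2 ^ (width - 1 - j).toNat)) 2) := by
  lift v to Nat using hv with m
  obtain ⟨hdig, hne, hlt, hget⟩ := pvBinChars_spec m
  rw [pvZfill_eq _ hdig hne width]
  set s := pvBinChars (m : Int) with hs
  set n := s.length with hn
  set p := (width - (n : Int)).toNat with hp
  have hM : ((List.replicate p '0' ++ s).length : Int) = (p : Int) + (n : Int) := by
    rw [List.length_append, List.length_replicate, ← hn]
    push_cast
    ring
  rw [hM, PySem.List.slice_from _ (by omega)]
  by_cases hw : width ≤ 0
  · have hR : PySem.List.pyRange 0 width 1 = [] := by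
      simp [PySem.List.pyRange, show ¬(0:Int) < width by omega]
    rw [hR, List.map_nil]
    have hdrop : List.drop (((p : Int) + (n : Int) - width).toNat) (List.replicate p '0' ++ s) = [] := by
      apply List.drop_eq_nil_of_le
      simp only [List.length_append, List.length_replicate]
      omega
    rw [hdrop, List.map_nil]
  · replace hw : 0 < width := by omega
    have hWcast : ((width.toNat : Nat) : Int) = width := by omega
    rw [← hWcast, PySem.List.pyRange_zero_natCast, List.map_map]
    set W := width.toNat with hW
    have hMW : (W : Int) ≤ (p : Int) + (n : Int) := by omega
    have hq : (((p : Int) + (n : Int) - (W : Int)).toNat) = p + n - W := by omega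
    rw [hq]
    apply List.ext_getElem
    · simp only [List.length_map, List.length_drop, List.length_append, List.length_replicate,
        List.length_range]
      omega
    · intro i h1 h2
      simp only [List.length_map, List.length_range] at h2
      simp only [List.getElem_map, List.getElem_drop, List.getElem_range, Function.comp_apply]
      have hk : (((W : Nat) : Int) - 1 - ((i : Nat) : Int)).toNat = W - 1 - i := by omega
      rw [hk]
      set k := W - 1 - i with hkdef
      -- RHS: the arithmetic bit
      have hpow : ((2 : Int) ^ k) = ((2 ^ k : Nat) : Int) := by push_cast; ring
      have hrhs : PySem.Int.mod (PySem.Int.floordiv (m : Int) (2 ^ k)) 2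
          = ((m / 2 ^ k % 2 : Nat) : Int) := by
        rw [hpow, PySem.Int.floordiv_natCast, show ((2:Int)) = ((2:Nat):Int) from rfl,
          PySem.Int.mod_natCast]
      rw [hrhs]
      have hplen : (List.replicate p ('0':Char)).length = p := by simp
      by_cases hip : p + n - W + i < p
      · -- inside the zero padding: bit index k is at least n, so the bit is 0
        rw [List.getElem_append_left (by omega)]
        have hm0 : m / 2 ^ k = 0 := by
          apply Nat.div_eq_of_lt
          calc m < 2 ^ n := hlt
          _ ≤ 2 ^ k := Nat.pow_le_pow_right (by omega) (by omega)
        rw [hm0]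
        simp
      · rw [List.getElem_append_right (by simp only [hplen]; omega)]
        have hkn : k < n := by omega
        have hgd := hget k hkn
        rw [List.getD_eq_getElem _ _ (by omega)] at hgd
        rw [← List.getD_eq_getElem s ' ' (by simp only [hplen]; omega)]
        rw [show p + n - W + i - (List.replicate p ('0':Char)).length = n - 1 - k from by
          simp only [hplen]; omega]
        rw [hget k hkn]
        by_cases hbit : m / 2 ^ k % 2 = 1
        · simp [hbit]
        · have h0 : m / 2 ^ k % 2 = 0 := by omega
          simp [h0]
-- the padded-or-truncated bit list equals B's arithmetic bit extraction
theorem pvAssemble (bits : List Int) (hb : ∀ b ∈ bits, b = 0 ∨ b = 1) (width : Int) :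
    (if ((List.replicate (width - (bits.length : Int)).toNat 0 ++ bits).length : Int) > width then
      PySem.List.slice (List.replicate (width - (bits.length : Int)).toNat 0 ++ bits)
        (some (((List.replicate (width - (bits.length : Int)).toNat 0 ++ bits).length : Int) - width)) none
    else List.replicate (width - (bits.length : Int)).toNat 0 ++ bits)
      = (PySem.List.pyRange 0 width 1).map (fun j =>
          PySem.Int.mod (PySem.Int.floordiv (bits.foldl (fun a b => 2 * a + b) 0)
            (2 ^ (width - 1 - j).toNat)) 2) := by
  by_cases hw : width ≤ 0
  · have hR : PySem.List.pyRange 0 width 1 = [] := by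
      simp [PySem.List.pyRange, show ¬(0:Int) < width by omega]
    have hp : (width - (bits.length : Int)).toNat = 0 := by omega
    rw [hR, hp]
    simp only [List.replicate_zero, List.nil_append, List.map_nil]
    by_cases hL : ((bits.length : Int) > width)
    · rw [if_pos hL, PySem.List.slice_from _ (by omega)]
      apply List.drop_eq_nil_of_le
      omega
    · rw [if_neg hL]
      have h0 : bits.length = 0 := by omega
      exact List.length_eq_zero_iff.mp h0
  · replace hw : 0 < width := by omega
    have hWcast : ((width.toNat : Nat) : Int) = width := by omega
    rw [← hWcast, PySem.List.pyRange_zero_natCast, List.map_map]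
    set W := width.toNat with hWdef
    set L := bits.length with hLdef
    by_cases hwl : (L : Int) < (W : Int)
    · -- zero-extension branch: the padded list has length exactly W
      have hLW : L < W := by omega
      have hplen : (List.replicate (((W : Int) - (L : Int)).toNat) (0 : Int) ++ bits).length = W := by
        simp only [List.length_append, List.length_replicate, ← hLdef]
        omega
      rw [if_neg (by rw [hplen]; omega)]
      apply List.ext_getElem
      · simp only [hplen, List.length_map, List.length_range]
      · intro i h1 h2
        simp only [List.getElem_map, List.getElem_range, Function.comp_apply]
        have hk : (((W : Int)) - 1 - (i : Int)).toNat = W - 1 - i := by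
          simp only [List.length_map, List.length_range] at h2
          omega
        rw [pvBitAt bits hb, hk]
        simp only [List.length_map, List.length_range] at h2
        have hip : (List.replicate (((W : Int) - (L : Int)).toNat) (0 : Int)).length = W - L := by
          simp only [List.length_replicate]; omega
        by_cases hi : i < W - L
        · rw [if_neg (by omega)]
          rw [List.getElem_append_left (by omega)]
          simp
        · rw [if_pos (by omega)]
          rw [List.getElem_append_right (by rw [hip]; omega)]
          rw [List.getD_eq_getElem _ _ (by omega)]
          congr 1
          rw [hip]
          omega
    · -- truncation branch
      have hWL : W ≤ L := by omega
      have hp0 : (((W : Int)) - (L : Int)).toNat = 0 := by omega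
      rw [hp0]
      simp only [List.replicate_zero, List.nil_append, ← hLdef]
      have hcommon : (if ((L : Int)) > (W : Int) then
          PySem.List.slice bits (some (((L : Int)) - (W : Int))) none else bits) = bits.drop (L - W) := by
        by_cases hgt : ((L : Int)) > (W : Int)
        · rw [if_pos hgt, PySem.List.slice_from _ (by omega)]
          congr 1
          omega
        · rw [if_neg hgt]
          have : L - W = 0 := by omega
          rw [this, List.drop_zero]
      rw [hcommon]
      apply List.ext_getElem
      · simp only [List.length_drop, List.length_map, List.length_range, ← hLdef]
        omega
      · intro i h1 h2
        simp only [List.getElem_map, List.getElem_range, Function.comp_apply]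
        simp only [List.length_map, List.length_range] at h2
        have hk : (((W : Int)) - 1 - (i : Int)).toNat = W - 1 - i := by omega
        rw [pvBitAt bits hb, hk]
        rw [if_pos (by omega)]
        rw [List.getElem_drop]
        rw [List.getD_eq_getElem _ _ (by omega)]
        congr 1
        omega

-- ===== VERDICT (by name: the statement is the Claim_ definition above) =====
theorem hex_string_to_bits_spec : Claim_equal_hex_string_to_bits := by
  intro hex_str width _ hpre
  unfold Spec_hex_string_to_bits hex_string_to_bits hex_string_to_bits_alt
  dsimp only
  obtain ⟨hb, hv⟩ := pvFold_spec (pvStripped hex_str) [] hpre (by simp)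
  simp only [List.foldl_nil] at hv
  rw [pvPadLoop_eq, pvFormat_eq _ (hv ▸ pvOfBits_nonneg _ hb) width, ← hv]
  exact pvAssemble _ hb width
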